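-- pv_equiv track=rewrite | github.com/pypi-data/pypi-mirror-237 | packages/atmosphyre/atmosphyre-0.0.5-py3-none-any.whl/atmosphyre/dispersion_functions.py | cube_ring
-- ===== SOURCE A (Python) =====
-- def cube_direction(direction):
--     direction_vectors=[[+1,0],[+1,-1],[0,-1],[-1,0],[-1,+1],[0,+1]]
--     return direction_vectors[direction]
--
-- def cube_add(hex,vec):
--     return [hex[0]+vec[0],hex[1]+vec[1]]
--
-- def cube_neighbor(cube,direction):
--     return cube_add(cube,cube_direction(direction))
--
-- def cube_scale(hex, factor):
--     return [hex[0]*factor,hex[1]*factor]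
--
-- def cube_ring(center, radius):
--     results = []
--     hex = cube_add(center,
--                         cube_scale(cube_direction(4), radius))
--     for i in range(0,6):
--         for j in range(0,radius):
--             results.append(hex)
--             hex = cube_neighbor(hex, i)
--     return results
-- ===== SOURCE B (Python) =====
-- def cube_ring(center, radius):
--     # Closed form: point (i, j) = center + radius * corner_offset[i] + j * dirs[i],
--     # where corner_offset[i] = dir(4) + dirs[0] + ... + dirs[i-1] (cumulative sums, precomputed).
--     dirs = [(1, 0), (1, -1), (0, -1), (-1, 0), (-1, 1), (0, 1)]
--     pre = [(-1, 1), (0, 1), (1, 0), (1, -1), (0, -1), (-1, 0)]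
--     return [[center[0] + radius * pre[i][0] + j * dirs[i][0],
--              center[1] + radius * pre[i][1] + j * dirs[i][1]]
--             for i in range(6) for j in range(radius)]
-- ===== Notes on version B (the rewrite author's own statement) =====
-- stated objective: alternative
-- what changed: B replaces A's stateful corner-to-corner walk (a running hex updated neighbor-by-neighbor through 6*radius iterations) with a closed-form formula: point (i,j) = center + radius*corner_offset[i] + j*dir[i], using a precomputed table of cumulative direction prefix sums for the corner offsets.
import Mathlib
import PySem

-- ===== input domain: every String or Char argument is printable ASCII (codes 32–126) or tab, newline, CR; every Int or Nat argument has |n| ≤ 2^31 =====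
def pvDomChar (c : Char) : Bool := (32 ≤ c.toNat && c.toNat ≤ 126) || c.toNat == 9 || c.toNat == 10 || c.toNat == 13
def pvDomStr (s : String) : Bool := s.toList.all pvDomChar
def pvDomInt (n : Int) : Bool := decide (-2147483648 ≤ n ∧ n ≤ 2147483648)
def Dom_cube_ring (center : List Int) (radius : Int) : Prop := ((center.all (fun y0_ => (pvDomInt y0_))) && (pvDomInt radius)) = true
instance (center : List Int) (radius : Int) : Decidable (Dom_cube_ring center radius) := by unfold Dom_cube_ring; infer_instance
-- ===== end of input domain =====

-- B replaces A's stateful neighbor-by-neighbor walk with a closed-form point formula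
-- from a precomputed table of cumulative direction offsets (objective: alternative, same cost).

-- ===== PORT A =====
-- indexing is exact here: cube_direction is only called with 0..5, and under
-- Pre_cube_ring (center length ≥ 2) every list indexed has the needed elements
def cube_direction (direction : Int) : List Int :=
  PySem.List.pyGetD [[1,0],[1,-1],[0,-1],[-1,0],[-1,1],[0,1]] direction []

def cube_add (hex vec : List Int) : List Int :=
  [PySem.List.pyGetD hex 0 0 + PySem.List.pyGetD vec 0 0,
   PySem.List.pyGetD hex 1 0 + PySem.List.pyGetD vec 1 0]

def cube_neighbor (cube : List Int) (direction : Int) : List Int :=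
  cube_add cube (cube_direction direction)

def cube_scale (hex : List Int) (factor : Int) : List Int :=
  [PySem.List.pyGetD hex 0 0 * factor, PySem.List.pyGetD hex 1 0 * factor]

def cube_ring (center : List Int) (radius : Int) : List (List Int) :=
  let hex0 := cube_add center (cube_scale (cube_direction 4) radius)
  let st := (PySem.List.pyRange 0 6 1).foldl
    (fun st i =>
      (PySem.List.pyRange 0 radius 1).foldl
        (fun st _j => (st.2 :: st.1, cube_neighbor st.2 i)) st)
    (([] : List (List Int)), hex0)
  st.1.reverse  -- results.append(hex) is ported as a cons-accumulator, reversed once at the end (same list, linear)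

-- ===== PORT B =====
def cube_ring_alt (center : List Int) (radius : Int) : List (List Int) :=
  let dirs : List (Int × Int) := [(1,0),(1,-1),(0,-1),(-1,0),(-1,1),(0,1)]
  let pre  : List (Int × Int) := [(-1,1),(0,1),(1,0),(1,-1),(0,-1),(-1,0)]
  (PySem.List.pyRange 0 6 1).flatMap (fun i =>
    (PySem.List.pyRange 0 radius 1).map (fun j =>
      [PySem.List.pyGetD center 0 0 + radius * (PySem.List.pyGetD pre i (0,0)).1
         + j * (PySem.List.pyGetD dirs i (0,0)).1,
       PySem.List.pyGetD center 1 0 + radius * (PySem.List.pyGetD pre i (0,0)).2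
         + j * (PySem.List.pyGetD dirs i (0,0)).2]))

-- ===== PRECONDITION & SPEC =====
-- Pre_ excludes center lists with fewer than 2 elements, on which Python A raises IndexError.
def Pre_cube_ring (center : List Int) (radius : Int) : Prop := 2 ≤ center.length
instance (center : List Int) (radius : Int) : Decidable (Pre_cube_ring center radius) := by unfold Pre_cube_ring; infer_instance
def pvWitness_cube_ring : List Int × Int := ([0, 0], 2)

def Spec_cube_ring (center : List Int) (radius : Int) (out : List (List Int)) : Prop := out = cube_ring_alt center radius
instance (center : List Int) (radius : Int) (out : List (List Int)) : Decidable (Spec_cube_ring center radius out) := by unfold Spec_cube_ring; infer_instance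

-- ===== CLAIM (what is proved, stated in full; the proofs are below) =====
def Claim_equal_cube_ring : Prop := ∀ (center : List Int) (radius : Int), Dom_cube_ring center radius → Pre_cube_ring center radius → Spec_cube_ring center radius (cube_ring center radius)

-- ===== LEMMAS AND PROOFS =====

-- A's inner loop from corner [x,y] along direction i emits the j-th step points and
-- ends at the next corner.
theorem foldl_walk (l : List Int) (i dx dy : Int) (hd : cube_direction i = [dx, dy])
    (res : List (List Int)) (x y : Int) :
    l.foldl (fun st (_j : Int) => (st.2 :: st.1, cube_neighbor st.2 i)) (res, ([x, y] : List Int))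
      = (((List.range l.length).map (fun (j : Nat) => [x + (j : Int) * dx, y + (j : Int) * dy])).reverse ++ res,
         ([x + (l.length : Int) * dx, y + (l.length : Int) * dy] : List Int)) := by
  induction l generalizing res x y with
  | nil => simp
  | cons a l ih =>
    have hstep : cube_neighbor [x, y] i = [x + dx, y + dy] := by
      simp [cube_neighbor, cube_add, hd, PySem.List.pyGetD]
    simp only [List.foldl_cons, hstep]
    rw [ih]
    simp only [List.length_cons, Prod.mk.injEq]
    constructor
    · rw [List.range_succ_eq_map, List.map_cons, List.map_map, List.reverse_cons,
        List.append_assoc, List.singleton_append]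
      simp only [Nat.cast_zero, zero_mul, add_zero]
      congr 1
      congr 1
      apply List.map_congr_left
      intro j _
      simp only [Function.comp_apply, List.cons.injEq, and_true]
      push_cast
      constructor <;> ring
    · simp only [List.cons.injEq, and_true]
      push_cast
      constructor <;> ring

theorem cube_ring_spec : Claim_equal_cube_ring := by
  intro center radius _hdom _hpre
  unfold Spec_cube_ring
  have h6 : PySem.List.pyRange 0 6 1 = [0, 1, 2, 3, 4, 5] := by decide
  by_cases hr : radius ≤ 0
  · simp [cube_ring, cube_ring_alt, h6, PySem.List.pyRange_one_eq_nil hr]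
  · push_neg at hr
    obtain ⟨m, rfl⟩ : ∃ m : Nat, radius = (m : Int) :=
      ⟨radius.toNat, (Int.toNat_of_nonneg hr.le).symm⟩
    have hn : PySem.List.pyRange 0 (m : Int) 1
        = List.map (fun (k : Nat) => (k : Int)) (List.range m) := by
      rw [PySem.List.pyRange_one]
      simp
    simp only [cube_ring, cube_ring_alt, h6, hn]
    simp only [List.foldl_cons, List.foldl_nil, List.flatMap_cons, List.flatMap_nil,
      List.map_map]
    have hhex : cube_add center (cube_scale (cube_direction 4) ((m : Nat) : Int))
        = [PySem.List.pyGetD center 0 0 + (-1) * (m : Int),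
           PySem.List.pyGetD center 1 0 + 1 * (m : Int)] := by
      simp [cube_add, cube_scale, cube_direction, PySem.List.pyGetD]
    rw [hhex]
    rw [foldl_walk _ 0 1 0 (by decide), foldl_walk _ 1 1 (-1) (by decide),
      foldl_walk _ 2 0 (-1) (by decide), foldl_walk _ 3 (-1) 0 (by decide),
      foldl_walk _ 4 (-1) 1 (by decide), foldl_walk _ 5 0 1 (by decide)]
    simp only [List.length_map, List.length_range, List.reverse_append, List.reverse_reverse,
      List.reverse_nil, List.nil_append, List.append_nil, List.append_assoc, PySem.List.pyGetD]
    simp only [List.append_nil, Function.comp_def]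
    have p0 : ((PySem.List.pyGet? ([(-1,1),(0,1),(1,0),(1,-1),(0,-1),(-1,0)] : List (Int × Int)) 0).getD (0,0)) = (-1,1) := by decide
    have p1 : ((PySem.List.pyGet? ([(-1,1),(0,1),(1,0),(1,-1),(0,-1),(-1,0)] : List (Int × Int)) 1).getD (0,0)) = (0,1) := by decide
    have p2 : ((PySem.List.pyGet? ([(-1,1),(0,1),(1,0),(1,-1),(0,-1),(-1,0)] : List (Int × Int)) 2).getD (0,0)) = (1,0) := by decide
    have p3 : ((PySem.List.pyGet? ([(-1,1),(0,1),(1,0),(1,-1),(0,-1),(-1,0)] : List (Int × Int)) 3).getD (0,0)) = (1,-1) := by decide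
    have p4 : ((PySem.List.pyGet? ([(-1,1),(0,1),(1,0),(1,-1),(0,-1),(-1,0)] : List (Int × Int)) 4).getD (0,0)) = (0,-1) := by decide
    have p5 : ((PySem.List.pyGet? ([(-1,1),(0,1),(1,0),(1,-1),(0,-1),(-1,0)] : List (Int × Int)) 5).getD (0,0)) = (-1,0) := by decide
    have d0 : ((PySem.List.pyGet? ([(1,0),(1,-1),(0,-1),(-1,0),(-1,1),(0,1)] : List (Int × Int)) 0).getD (0,0)) = (1,0) := by decide
    have d1 : ((PySem.List.pyGet? ([(1,0),(1,-1),(0,-1),(-1,0),(-1,1),(0,1)] : List (Int × Int)) 1).getD (0,0)) = (1,-1) := by decide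
    have d2 : ((PySem.List.pyGet? ([(1,0),(1,-1),(0,-1),(-1,0),(-1,1),(0,1)] : List (Int × Int)) 2).getD (0,0)) = (0,-1) := by decide
    have d3 : ((PySem.List.pyGet? ([(1,0),(1,-1),(0,-1),(-1,0),(-1,1),(0,1)] : List (Int × Int)) 3).getD (0,0)) = (-1,0) := by decide
    have d4 : ((PySem.List.pyGet? ([(1,0),(1,-1),(0,-1),(-1,0),(-1,1),(0,1)] : List (Int × Int)) 4).getD (0,0)) = (-1,1) := by decide
    have d5 : ((PySem.List.pyGet? ([(1,0),(1,-1),(0,-1),(-1,0),(-1,1),(0,1)] : List (Int × Int)) 5).getD (0,0)) = (0,1) := by decide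
    simp only [p0, p1, p2, p3, p4, p5, d0, d1, d2, d3, d4, d5]
    congr 1
    · apply List.map_congr_left
      intro j _
      simp only [List.cons.injEq, and_true]
      push_cast
      constructor <;> ring
    congr 1
    · apply List.map_congr_left
      intro j _
      simp only [List.cons.injEq, and_true]
      push_cast
      constructor <;> ring
    congr 1
    · apply List.map_congr_left
      intro j _
      simp only [List.cons.injEq, and_true]
      push_cast
      constructor <;> ring
    congr 1
    · apply List.map_congr_left
      intro j _
      simp only [List.cons.injEq, and_true]
      push_cast
      constructor <;> ring
    congr 1
    · apply List.map_congr_left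
      intro j _
      simp only [List.cons.injEq, and_true]
      push_cast
      constructor <;> ring
    apply List.map_congr_left
    intro j _
    simp only [List.cons.injEq, and_true]
    push_cast
    constructor <;> ring
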